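-- pv_equiv track=rewrite | github.com/keyneth7/bfs-maze | client/Modules/bfs_find.py | bfs_algorithm
-- ===== SOURCE A (Python) =====
-- from collections import deque
--
-- def bfs_algorithm(maze, start, end):
--     rows = len(maze)
--     cols = len(maze[0])
--     visited = [[False] * cols for _ in range(rows)]
--     queue = deque([start])
--     parent = {}
--
--     while queue:
--         current = queue.popleft()
--         if current == end:
--             path = []
--             while current != start:
--                 path.append(current)
--                 current = parent[current]
--             path.append(start)
--             return path[::-1]
--
--         row, col = current
--         directions = [(0, -1), (0, 1), (1, 0), (-1, 0)]  # Left, Right, Down, Up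
--
--         for dr, dc in directions:
--             new_row, new_col = row + dr, col + dc
--             if (
--                 0 <= new_row < rows
--                 and 0 <= new_col < cols
--                 and not visited[new_row][new_col]
--             ):
--                 if (maze[row][col] & (8 >> (directions.index((dr, dc))))) == 0:
--                     queue.append((new_row, new_col))
--                     visited[new_row][new_col] = True
--                     parent[(new_row, new_col)] = current
--     return None
-- ===== SOURCE B (Python) =====
-- def bfs_algorithm(maze, start, end):
--     # Level-synchronous BFS whose frontier holds whole paths: no deque, no
--     # parent map, no backtracking reconstruction phase.
--     rows, cols = len(maze), len(maze[0])
--     visited = [[False] * cols for _ in range(rows)]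
--     directions = ((0, -1), (0, 1), (1, 0), (-1, 0))  # Left, Right, Down, Up
--     frontier = [[start]]  # each entry is a complete path ending at its cell
--     while frontier:
--         nxt = []
--         for path in frontier:
--             cur = path[-1]
--             if cur == end:
--                 return path
--             row, col = cur
--             for i, (dr, dc) in enumerate(directions):
--                 nr, nc = row + dr, col + dc
--                 if (0 <= nr < rows and 0 <= nc < cols
--                         and not visited[nr][nc]
--                         and maze[row][col] & (8 >> i) == 0):
--                     visited[nr][nc] = True
--                     nxt.append(path + [(nr, nc)])
--         frontier = nxt
--     return None
-- ===== Notes on version B (the rewrite author's own statement) =====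
-- stated objective: alternative
-- what changed: B replaces A's deque-plus-parent-dict BFS with in-loop backtracking reconstruction by a level-synchronous frontier BFS whose queue entries are complete paths, so there is no deque, no parent map and no reconstruction phase: the found path is returned as stored.
-- outside the precondition, e.g. on bfs_algorithm([[15], [0, 0]], (0, 0), (1, 1)): A returns None, B returns None; on bfs_algorithm([[0], [0]], (-1, 0), (0, 0)): A returns [(-1, 0), (0, 0)], B returns [(-1, 0), (0, 0)]
import Mathlib
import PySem

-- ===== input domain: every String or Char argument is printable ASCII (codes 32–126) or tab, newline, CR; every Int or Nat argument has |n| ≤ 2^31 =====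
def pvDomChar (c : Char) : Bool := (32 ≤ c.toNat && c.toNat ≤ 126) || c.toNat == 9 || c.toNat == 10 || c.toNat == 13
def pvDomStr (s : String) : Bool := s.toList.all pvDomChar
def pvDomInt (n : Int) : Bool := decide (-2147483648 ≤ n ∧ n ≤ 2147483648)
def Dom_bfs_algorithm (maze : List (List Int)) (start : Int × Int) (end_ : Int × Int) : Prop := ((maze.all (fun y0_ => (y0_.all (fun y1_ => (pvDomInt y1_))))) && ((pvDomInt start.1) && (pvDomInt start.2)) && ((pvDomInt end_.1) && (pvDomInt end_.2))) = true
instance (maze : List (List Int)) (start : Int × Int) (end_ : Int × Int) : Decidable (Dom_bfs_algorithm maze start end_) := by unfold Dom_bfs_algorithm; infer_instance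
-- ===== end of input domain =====

-- B replaces A's deque + parent-dict BFS (with in-loop backtracking reconstruction) by a
-- level-synchronous frontier BFS whose entries are complete paths; same return value,
-- no argument is mutated by either.

abbrev pvSt := List (Int × Int) × List (List Bool) × PySem.Dict (Int × Int) (Int × Int)
abbrev pvPD := PySem.Dict (Int × Int) (Int × Int)
abbrev pvPath := List (Int × Int)

-- ===== PORT A =====
def pvDirsA : List (Int × Int) := [(0, -1), (0, 1), (1, 0), (-1, 0)]  -- Left, Right, Down, Up

-- visited[r][c]  (read only under the in-bounds guard, as in the Python)
def pvVisGetA (v : List (List Bool)) (r c : Int) : Bool :=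
  ((PySem.List.pyGet? v r).map (fun row => (PySem.List.pyGet? row c).getD true)).getD true

-- visited[r][c] = True
def pvVisSetA (v : List (List Bool)) (r c : Int) : List (List Bool) :=
  PySem.List.pySetD v r (PySem.List.pySetD (PySem.List.pyGetD v r []) c true)

-- maze[r][c]  (read only where Python does not raise, inside Pre_)
def pvMazeA (maze : List (List Int)) (r c : Int) : Int :=
  PySem.List.pyGetD (PySem.List.pyGetD maze r []) c 0

-- body of A's `for dr, dc in directions` loop, one direction
def pvStepA (maze : List (List Int)) (rows cols row col : Int) (st : pvSt) (d : Int × Int) : pvSt :=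
  let nr := row + d.1
  let nc := col + d.2
  if 0 ≤ nr ∧ nr < rows ∧ 0 ≤ nc ∧ nc < cols ∧ pvVisGetA st.2.1 nr nc = false then
    if PySem.Int.band (pvMazeA maze row col) ((8 : Int) >>> ((PySem.List.index? pvDirsA d).getD 0)) = 0 then
      (st.1 ++ [(nr, nc)], pvVisSetA st.2.1 nr nc, st.2.2.insert (nr, nc) (row, col))
    else st
  else st

-- A's reconstruction: path = []; while current != start: append, step; append(start); path[::-1]
def pvWalkA (start : Int × Int) : Nat → pvPD → (Int × Int) → List (Int × Int) → Option (List (Int × Int))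
  | 0, _, _, _ => none  -- fuel guard only; never reached on inputs the Python terminates on
  | f + 1, p, cur, acc =>
    if cur = start then some ((acc ++ [start]).reverse)
    else
      match p.get? cur with
      | some nxt => pvWalkA start f p nxt (acc ++ [cur])
      | none => none  -- Python KeyError; unreachable from A's states

-- A's `while queue` loop, early exit at end
def pvLoopA (maze : List (List Int)) (rows cols : Int) (start end_ : Int × Int) (wf : Nat) :
    Nat → List (Int × Int) → List (List Bool) → pvPD → Option (List (Int × Int))
  | 0, _, _, _ => none  -- fuel guard only (fuel is chosen ≥ the number of iterations)
  | _ + 1, [], _, _ => none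
  | f + 1, cur :: q, v, p =>
    if cur = end_ then pvWalkA start wf p cur []
    else
      let st := pvDirsA.foldl (pvStepA maze rows cols cur.1 cur.2) (q, v, p)
      pvLoopA maze rows cols start end_ wf f st.1 st.2.1 st.2.2

def bfs_algorithm (maze : List (List Int)) (start : Int × Int) (end_ : Int × Int) :
    Option (List (Int × Int)) :=
  let rows : Int := maze.length
  let cols : Int := (PySem.List.pyGetD maze 0 []).length
  let visited := List.replicate maze.length (List.replicate (PySem.List.pyGetD maze 0 []).length false)
  let fuel := 2 * maze.length * (PySem.List.pyGetD maze 0 []).length + 2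
  pvLoopA maze rows cols start end_ fuel fuel [start] visited PySem.Dict.empty

-- ===== PORT B =====
def pvDirsB : List (Int × Int) := [(0, -1), (0, 1), (1, 0), (-1, 0)]  -- Left, Right, Down, Up

def pvVisGetB (v : List (List Bool)) (r c : Int) : Bool :=
  ((PySem.List.pyGet? v r).map (fun row => (PySem.List.pyGet? row c).getD true)).getD true

def pvVisSetB (v : List (List Bool)) (r c : Int) : List (List Bool) :=
  PySem.List.pySetD v r (PySem.List.pySetD (PySem.List.pyGetD v r []) c true)

def pvMazeB (maze : List (List Int)) (r c : Int) : Int :=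
  PySem.List.pyGetD (PySem.List.pyGetD maze r []) c 0

-- path[-1]  (paths in the frontier are never empty)
def pvLastC (path : pvPath) : Int × Int := PySem.List.pyGetD path (-1) (0, 0)

-- body of B's `for i, (dr, dc) in enumerate(directions)` loop: state (nxt, visited)
def pvStepB (maze : List (List Int)) (rows cols : Int) (path : pvPath) (row col : Int)
    (st : List pvPath × List (List Bool)) (e : Int × (Int × Int)) : List pvPath × List (List Bool) :=
  let nr := row + e.2.1
  let nc := col + e.2.2
  if 0 ≤ nr ∧ nr < rows ∧ 0 ≤ nc ∧ nc < cols ∧ pvVisGetB st.2 nr nc = false ∧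
      PySem.Int.band (pvMazeB maze row col) ((8 : Int) >>> e.1.toNat) = 0 then
    (st.1 ++ [path ++ [(nr, nc)]], pvVisSetB st.2 nr nc)
  else st

-- B's `for path in frontier` scan with the early return
def pvScanB (maze : List (List Int)) (rows cols : Int) (end_ : Int × Int) :
    List pvPath → List pvPath → List (List Bool) →
    pvPath ⊕ (List pvPath × List (List Bool))
  | [], nxt, v => Sum.inr (nxt, v)
  | path :: rest, nxt, v =>
    let cur := pvLastC path
    if cur = end_ then Sum.inl path
    else
      let st := (PySem.List.enumerate pvDirsB 0).foldl
        (pvStepB maze rows cols path cur.1 cur.2) (nxt, v)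
      pvScanB maze rows cols end_ rest st.1 st.2

-- B's `while frontier` level loop
def pvLoopBl (maze : List (List Int)) (rows cols : Int) (end_ : Int × Int) :
    Nat → List pvPath → List (List Bool) → Option pvPath
  | 0, _, _ => none  -- fuel guard only (fuel is chosen ≥ the number of levels)
  | f + 1, frontier, v =>
    if frontier = [] then none
    else
      match pvScanB maze rows cols end_ frontier [] v with
      | .inl path => some path
      | .inr (nxt, v') => pvLoopBl maze rows cols end_ f nxt v'

def bfs_algorithm_alt (maze : List (List Int)) (start : Int × Int) (end_ : Int × Int) :
    Option (List (Int × Int)) :=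
  let rows : Int := maze.length
  let cols : Int := (PySem.List.pyGetD maze 0 []).length
  let visited := List.replicate maze.length (List.replicate (PySem.List.pyGetD maze 0 []).length false)
  let fuel := 2 * maze.length * (PySem.List.pyGetD maze 0 []).length + 2
  pvLoopBl maze rows cols end_ fuel [[start]] visited

-- ===== PRECONDITION & SPEC =====
-- Pre_ excludes: the empty maze (A raises IndexError on maze[0]); and, unless start == end
-- (where A returns [start] before touching the grid) or start lies so far outside the grid
-- that no neighbour is in bounds (where A explores nothing and returns None), it requires a
-- rectangular maze and an in-bounds start — outside that, A can raise IndexError mid-search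
-- on a short row, or read cells through Python's negative-index wraparound, an accident of
-- indexing that B happens to share in Python but which no caller should rely on.
def Pre_bfs_algorithm (maze : List (List Int)) (start : Int × Int) (end_ : Int × Int) : Prop :=
  maze ≠ [] ∧
    (start = end_ ∨
      ((∀ row ∈ maze, row.length = (maze.headD []).length) ∧
        0 ≤ start.1 ∧ start.1 < (maze.length : Int) ∧
        0 ≤ start.2 ∧ start.2 < ((maze.headD []).length : Int)) ∨
      (¬(0 ≤ start.1 ∧ start.1 < (maze.length : Int) ∧ 0 ≤ start.2 - 1 ∧ start.2 - 1 < ((maze.headD []).length : Int)) ∧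
       ¬(0 ≤ start.1 ∧ start.1 < (maze.length : Int) ∧ 0 ≤ start.2 + 1 ∧ start.2 + 1 < ((maze.headD []).length : Int)) ∧
       ¬(0 ≤ start.1 + 1 ∧ start.1 + 1 < (maze.length : Int) ∧ 0 ≤ start.2 ∧ start.2 < ((maze.headD []).length : Int)) ∧
       ¬(0 ≤ start.1 - 1 ∧ start.1 - 1 < (maze.length : Int) ∧ 0 ≤ start.2 ∧ start.2 < ((maze.headD []).length : Int))))

instance (maze : List (List Int)) (start : Int × Int) (end_ : Int × Int) : Decidable (Pre_bfs_algorithm maze start end_) := by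
  unfold Pre_bfs_algorithm; infer_instance

def pvWitness_bfs_algorithm : List (List Int) × (Int × Int) × (Int × Int) :=
  ([[0, 0], [0, 0]], (0, 0), (1, 1))

def Spec_bfs_algorithm (maze : List (List Int)) (start : Int × Int) (end_ : Int × Int) (out : Option (List (Int × Int))) : Prop := out = bfs_algorithm_alt maze start end_
instance (maze : List (List Int)) (start : Int × Int) (end_ : Int × Int) (out : Option (List (Int × Int))) : Decidable (Spec_bfs_algorithm maze start end_ out) := by unfold Spec_bfs_algorithm; infer_instance

-- ===== CLAIM (what is proved, stated in full; the proofs are below) =====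
def Claim_equal_bfs_algorithm : Prop := ∀ (maze : List (List Int)) (start : Int × Int) (end_ : Int × Int), Dom_bfs_algorithm maze start end_ → Pre_bfs_algorithm maze start end_ → Spec_bfs_algorithm maze start end_ (bfs_algorithm maze start end_)

-- ===== LEMMAS AND PROOFS =====

def pvInR (rows cols : Int) (k : Int × Int) : Prop :=
  0 ≤ k.1 ∧ k.1 < rows ∧ 0 ≤ k.2 ∧ k.2 < cols

def pvDims (rows cols : Int) (v : List (List Bool)) : Prop :=
  ((v.length : Int) = rows ∧ ∀ row ∈ v, (row.length : Int) = cols)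

def pvInvV (p : pvPD) (v : List (List Bool)) : Prop :=
  ∀ k : Int × Int, p.contains k = true → pvVisGetA v k.1 k.2 = true

def pvInvK (rows cols : Int) (p : pvPD) : Prop :=
  ∀ k : Int × Int, p.contains k = true → pvInR rows cols k

-- the measure: in-bounds unvisited cells
def pvMvis (rows cols : Int) (v : List (List Bool)) : Nat :=
  ((Finset.range rows.toNat ×ˢ Finset.range cols.toNat).filter
    (fun rc : Nat × Nat => pvVisGetA v (rc.1 : Int) (rc.2 : Int) = false)).card

-- every open in-bounds out-neighbour of start is visited (holds after start's expansion)
def pvG (maze : List (List Int)) (rows cols : Int) (start : Int × Int) (v : List (List Bool)) : Prop :=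
  ∀ e ∈ PySem.List.enumerate pvDirsB 0,
    (0 ≤ start.1 + e.2.1 ∧ start.1 + e.2.1 < rows ∧ 0 ≤ start.2 + e.2.2 ∧ start.2 + e.2.2 < cols ∧
     PySem.Int.band (pvMazeA maze start.1 start.2) ((8 : Int) >>> e.1.toNat) = 0) →
    pvVisGetA v (start.1 + e.2.1) (start.2 + e.2.2) = true

-- joint invariant of A's (pending, visited, parent) state and B's (pending, visited) state
def pvINV (maze : List (List Int)) (rows cols : Int) (start : Int × Int) (K : Nat)
    (pend : List pvPath) (v : List (List Bool)) (p : pvPD) : Prop :=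
  pvDims rows cols v ∧ pvInvV p v ∧ pvInvK rows cols p ∧
  ((∀ path ∈ pend, path = [start]) ∨ pvG maze rows cols start v) ∧
  (∀ path ∈ pend, path ≠ [] ∧ path.length + pvMvis rows cols v ≤ K ∧
    (pvLastC path = start ∨
      ∀ f, path.length ≤ f → pvWalkA start f p (pvLastC path) [] = some path))

theorem pvLastC_append (l : pvPath) (c : Int × Int) : pvLastC (l ++ [c]) = c := by
  simp [pvLastC, PySem.List.pyGetD_neg_one_append_singleton]

theorem pvLastC_singleton (c : Int × Int) : pvLastC [c] = c := by
  simpa using pvLastC_append [] c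

theorem pvVisGetA_eq (v : List (List Bool)) (rows cols r c : Int)
    (hd : pvDims rows cols v) (h : pvInR rows cols (r, c)) :
    pvVisGetA v r c = (v.getD r.toNat []).getD c.toNat true := by
  obtain ⟨hlen, hrowlen⟩ := hd
  obtain ⟨h1, h2, h3, h4⟩ := h
  dsimp only at h1 h2 h3 h4
  have hrn : r.toNat < v.length := by omega
  have hrow : v.getD r.toNat [] = v[r.toNat] := List.getD_eq_getElem v [] hrn
  have hcl : (v[r.toNat].length : Int) = cols := hrowlen _ (List.getElem_mem _)
  have hcn : c.toNat < v[r.toNat].length := by omega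
  simp only [pvVisGetA]
  rw [PySem.List.pyGet?_eq_some_getElem v h1 (by omega)]
  simp only [Option.map_some, Option.getD_some]
  rw [PySem.List.pyGet?_eq_some_getElem _ h3 (by omega)]
  simp only [Option.getD_some, List.getD_eq_getElem?_getD]
  rw [List.getElem?_eq_getElem hrn]
  simp only [Option.getD_some]
  rw [List.getElem?_eq_getElem hcn]
  simp

theorem pvVisSetA_eq (v : List (List Bool)) (rows cols r c : Int)
    (hd : pvDims rows cols v) (h : pvInR rows cols (r, c)) :
    pvVisSetA v r c = v.set r.toNat ((v.getD r.toNat []).set c.toNat true) := by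
  obtain ⟨hlen, hrowlen⟩ := hd
  obtain ⟨h1, h2, h3, h4⟩ := h
  dsimp only at h1 h2 h3 h4
  have hrn : r.toNat < v.length := by omega
  simp only [pvVisSetA]
  rw [PySem.List.pySetD_of_nonneg _ _ h3, PySem.List.pySetD_of_nonneg _ _ h1,
      PySem.List.pyGetD_eq_getElem v [] h1 (by omega), List.getD_eq_getElem v [] hrn]

theorem pv_dims_set (v : List (List Bool)) (rows cols r c : Int)
    (hd : pvDims rows cols v) (h : pvInR rows cols (r, c)) :
    pvDims rows cols (pvVisSetA v r c) := by
  have hset := pvVisSetA_eq v rows cols r c hd h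
  obtain ⟨hlen, hrowlen⟩ := hd
  obtain ⟨h1, h2, h3, h4⟩ := h
  dsimp only at h1 h2 h3 h4
  have hrn : r.toNat < v.length := by omega
  rw [hset]
  constructor
  · simpa using hlen
  · intro row hrow
    rcases List.mem_or_eq_of_mem_set hrow with hmem | heq
    · exact hrowlen _ hmem
    · subst heq
      simp only [List.length_set, List.getD_eq_getElem v [] hrn]
      exact hrowlen _ (List.getElem_mem _)

theorem pv_visget_set_self (v : List (List Bool)) (rows cols r c : Int)
    (hd : pvDims rows cols v) (h : pvInR rows cols (r, c)) :
    pvVisGetA (pvVisSetA v r c) r c = true := by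
  have hset := pvVisSetA_eq v rows cols r c hd h
  have hd' := pv_dims_set v rows cols r c hd h
  rw [pvVisGetA_eq _ rows cols r c hd' h, hset]
  obtain ⟨hlen, hrowlen⟩ := hd
  obtain ⟨h1, h2, h3, h4⟩ := h
  dsimp only at h1 h2 h3 h4
  have hrn : r.toNat < v.length := by omega
  have hcl : (v[r.toNat].length : Int) = cols := hrowlen _ (List.getElem_mem _)
  have hcn : c.toNat < v[r.toNat].length := by omega
  have hbase : v.getD r.toNat [] = v[r.toNat] := List.getD_eq_getElem v [] hrn
  rw [hbase]
  have hrow : (v.set r.toNat (v[r.toNat].set c.toNat true)).getD r.toNat [] =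
      v[r.toNat].set c.toNat true := by
    rw [List.getD_eq_getElem _ [] (by simpa using hrn)]
    exact List.getElem_set_self _
  rw [hrow, List.getD_eq_getElem _ true (by rw [List.length_set]; exact hcn)]
  exact List.getElem_set_self _

theorem pv_visget_set_ne (v : List (List Bool)) (rows cols r c r' c' : Int)
    (hd : pvDims rows cols v) (h : pvInR rows cols (r, c)) (h' : pvInR rows cols (r', c'))
    (hne : ¬(r = r' ∧ c = c')) :
    pvVisGetA (pvVisSetA v r c) r' c' = pvVisGetA v r' c' := by
  have hset := pvVisSetA_eq v rows cols r c hd h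
  have hd' := pv_dims_set v rows cols r c hd h
  rw [pvVisGetA_eq _ rows cols r' c' hd' h', pvVisGetA_eq v rows cols r' c' hd h', hset]
  obtain ⟨hlen, hrowlen⟩ := hd
  obtain ⟨h1, h2, h3, h4⟩ := h
  obtain ⟨g1, g2, g3, g4⟩ := h'
  dsimp only at h1 h2 h3 h4 g1 g2 g3 g4
  have hrn : r.toNat < v.length := by omega
  have hrn' : r'.toNat < v.length := by omega
  have hbase : v.getD r.toNat [] = v[r.toNat] := List.getD_eq_getElem v [] hrn
  rw [hbase]
  by_cases hr : r = r'
  · subst hr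
    have hcne : c.toNat ≠ c'.toNat := by omega
    have hcl : (v[r.toNat].length : Int) = cols := hrowlen _ (List.getElem_mem _)
    have hcn' : c'.toNat < v[r.toNat].length := by omega
    have hrow : (v.set r.toNat (v[r.toNat].set c.toNat true)).getD r.toNat [] =
        v[r.toNat].set c.toNat true := by
      rw [List.getD_eq_getElem _ [] (by simpa using hrn)]
      exact List.getElem_set_self _
    rw [hrow, List.getD_eq_getElem _ true (by rw [List.length_set]; exact hcn'),
        List.getD_eq_getElem _ [] hrn, List.getD_eq_getElem _ true hcn']
    exact List.getElem_set_ne hcne _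
  · have hrne : r.toNat ≠ r'.toNat := by omega
    have hrow : (v.set r.toNat (v[r.toNat].set c.toNat true)).getD r'.toNat [] =
        v.getD r'.toNat [] := by
      rw [List.getD_eq_getElem _ [] (by simpa using hrn'), List.getD_eq_getElem v [] hrn']
      exact List.getElem_set_ne hrne _
    rw [hrow]

theorem pv_visget_set_mono (v : List (List Bool)) (rows cols r c r' c' : Int)
    (hd : pvDims rows cols v) (h : pvInR rows cols (r, c)) (h' : pvInR rows cols (r', c'))
    (ht : pvVisGetA v r' c' = true) :
    pvVisGetA (pvVisSetA v r c) r' c' = true := by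
  by_cases he : r = r' ∧ c = c'
  · rw [← he.1, ← he.2]
    exact pv_visget_set_self v rows cols r c hd h
  · rw [pv_visget_set_ne v rows cols r c r' c' hd h h' he]
    exact ht

theorem pv_mvis_set (v : List (List Bool)) (rows cols r c : Int)
    (hd : pvDims rows cols v) (h : pvInR rows cols (r, c))
    (hf : pvVisGetA v r c = false) :
    pvMvis rows cols (pvVisSetA v r c) + 1 ≤ pvMvis rows cols v := by
  have hd' := pv_dims_set v rows cols r c hd h
  obtain ⟨hi1, hi2, hi3, hi4⟩ := h
  dsimp only at hi1 hi2 hi3 hi4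
  have hmem : ∀ (w : List (List Bool)) (rc : Nat × Nat),
      rc ∈ (Finset.range rows.toNat ×ˢ Finset.range cols.toNat).filter
        (fun rc : Nat × Nat => pvVisGetA w (rc.1 : Int) (rc.2 : Int) = false) ↔
      (rc.1 < rows.toNat ∧ rc.2 < cols.toNat ∧ pvVisGetA w (rc.1 : Int) (rc.2 : Int) = false) := by
    intro w rc
    simp [Finset.mem_filter, Finset.mem_product, and_assoc]
  have hinr : ∀ rc : Nat × Nat, rc.1 < rows.toNat → rc.2 < cols.toNat →
      pvInR rows cols ((rc.1 : Int), (rc.2 : Int)) := by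
    intro rc hx hy
    exact ⟨by omega, by omega, by omega, by omega⟩
  have hss : (Finset.range rows.toNat ×ˢ Finset.range cols.toNat).filter
        (fun rc : Nat × Nat => pvVisGetA (pvVisSetA v r c) (rc.1 : Int) (rc.2 : Int) = false) ⊂
      (Finset.range rows.toNat ×ˢ Finset.range cols.toNat).filter
        (fun rc : Nat × Nat => pvVisGetA v (rc.1 : Int) (rc.2 : Int) = false) := by
    constructor
    · intro rc hrc
      rw [hmem] at hrc
      obtain ⟨hx, hy, hfv⟩ := hrc
      rw [hmem]
      refine ⟨hx, hy, ?_⟩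
      by_cases heq : r = (rc.1 : Int) ∧ c = (rc.2 : Int)
      · exfalso
        rw [← heq.1, ← heq.2] at hfv
        rw [pv_visget_set_self v rows cols r c hd ⟨hi1, hi2, hi3, hi4⟩] at hfv
        simp at hfv
      · rw [pv_visget_set_ne v rows cols r c _ _ hd ⟨hi1, hi2, hi3, hi4⟩ (hinr rc hx hy) heq] at hfv
        exact hfv
    · intro hsub
      have hin : ((r.toNat, c.toNat) : Nat × Nat) ∈
          (Finset.range rows.toNat ×ˢ Finset.range cols.toNat).filter
            (fun rc : Nat × Nat => pvVisGetA v (rc.1 : Int) (rc.2 : Int) = false) := by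
        rw [hmem]
        refine ⟨by omega, by omega, ?_⟩
        simpa [Int.toNat_of_nonneg hi1, Int.toNat_of_nonneg hi3] using hf
      have hout := hsub hin
      rw [hmem] at hout
      obtain ⟨-, -, hfv⟩ := hout
      dsimp only at hfv
      rw [Int.toNat_of_nonneg hi1, Int.toNat_of_nonneg hi3] at hfv
      rw [pv_visget_set_self v rows cols r c hd ⟨hi1, hi2, hi3, hi4⟩] at hfv
      simp at hfv
  have := Finset.card_lt_card hss
  simp only [pvMvis]
  omega

theorem pvVisGetB_eq : pvVisGetB = pvVisGetA := rfl
theorem pvVisSetB_eq : pvVisSetB = pvVisSetA := rfl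
theorem pvMazeB_eq : pvMazeB = pvMazeA := rfl

-- walking from start always yields [start], whatever the parent dict
theorem pv_walk_start (start : Int × Int) (f : Nat) (p : pvPD) (hf : 1 ≤ f) :
    pvWalkA start f p start [] = some [start] := by
  cases f with
  | zero => omega
  | succ g => simp [pvWalkA]

-- the accumulator only appends (reversed) to the result
theorem pv_walk_acc (start : Int × Int) :
    ∀ (f : Nat) (p : pvPD) (cur : Int × Int) (acc : List (Int × Int)),
      pvWalkA start f p cur acc = (pvWalkA start f p cur []).map (fun q => q ++ acc.reverse) := by
  intro f
  induction f with
  | zero => intro p cur acc; rfl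
  | succ g ih =>
    intro p cur acc
    simp only [pvWalkA]
    by_cases h : cur = start
    · simp [h]
    · simp only [if_neg h]
      cases hg : p.get? cur with
      | none => rfl
      | some nxt =>
        dsimp only
        rw [ih p nxt (acc ++ [cur]), ih p nxt ([] ++ [cur])]
        cases pvWalkA start g p nxt [] with
        | none => rfl
        | some q => simp

-- a successful walk is unchanged when the dict is extended at fresh keys
theorem pv_walk_mono (start : Int × Int) :
    ∀ (f : Nat) (p p' : pvPD) (cur : Int × Int) (acc q : List (Int × Int)),
      pvWalkA start f p cur acc = some q →
      (∀ k, p.contains k = true → p'.get? k = p.get? k) →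
      pvWalkA start f p' cur acc = some q := by
  intro f
  induction f with
  | zero => intro p p' cur acc q h _; exact absurd h (by simp [pvWalkA])
  | succ g ih =>
    intro p p' cur acc q h hsub
    simp only [pvWalkA] at h ⊢
    by_cases hc : cur = start
    · simpa [hc] using h
    · simp only [if_neg hc] at h ⊢
      cases hg : p.get? cur with
      | none => rw [hg] at h; exact absurd h (by simp)
      | some nxt =>
        rw [hg] at h
        have hcont : p.contains cur = true := by
          rw [PySem.Dict.contains_eq_isSome_get?, hg]; rfl
        rw [hsub cur hcont, hg]
        exact ih p p' nxt (acc ++ [cur]) q h hsub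

-- under pvG at this cell, one expansion is a no-op on both sides
theorem pv_fold_noop (maze : List (List Int)) (rows cols : Int) (c : Int × Int) (path : pvPath) :
    ∀ (dirs : List (Int × (Int × Int))) (q : List (Int × Int)) (ns : List pvPath)
      (v : List (List Bool)) (p : pvPD),
      (∀ e ∈ dirs,
        (0 ≤ c.1 + e.2.1 ∧ c.1 + e.2.1 < rows ∧ 0 ≤ c.2 + e.2.2 ∧ c.2 + e.2.2 < cols ∧
          PySem.Int.band (pvMazeA maze c.1 c.2) ((8 : Int) >>> e.1.toNat) = 0) →
        pvVisGetA v (c.1 + e.2.1) (c.2 + e.2.2) = true) →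
      (∀ e ∈ dirs, ((PySem.List.index? pvDirsA e.2).getD 0) = e.1.toNat) →
      (dirs.map Prod.snd).foldl (pvStepA maze rows cols c.1 c.2) (q, v, p) = (q, v, p) ∧
      dirs.foldl (pvStepB maze rows cols path c.1 c.2) (ns, v) = (ns, v) := by
  intro dirs
  induction dirs with
  | nil => intro q ns v p _ _; exact ⟨rfl, rfl⟩
  | cons e rest ih =>
    intro q ns v p hG hidx
    have hGe := hG e (List.mem_cons_self)
    have hie := hidx e (List.mem_cons_self)
    have hA : pvStepA maze rows cols c.1 c.2 (q, v, p) e.2 = (q, v, p) := by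
      simp only [pvStepA]
      split_ifs with h1 h2
      · exfalso
        obtain ⟨a1, a2, a3, a4, a5⟩ := h1
        rw [hie] at h2
        rw [hGe ⟨a1, a2, a3, a4, h2⟩] at a5
        exact Bool.noConfusion a5
      · rfl
      · rfl
    have hB : pvStepB maze rows cols path c.1 c.2 (ns, v) e = (ns, v) := by
      simp only [pvStepB, pvVisGetB_eq, pvMazeB_eq]
      rw [if_neg]
      rintro ⟨a1, a2, a3, a4, a5, a6⟩
      rw [hGe ⟨a1, a2, a3, a4, a6⟩] at a5
      exact Bool.noConfusion a5
    simp only [List.map_cons, List.foldl_cons, hA, hB]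
    exact ih q ns v p (fun e' he' => hG e' (List.mem_cons_of_mem _ he'))
      (fun e' he' => hidx e' (List.mem_cons_of_mem _ he'))

-- the joint expansion lemma: A's directions-fold and B's enumerate-fold correspond
theorem pv_foldAB (maze : List (List Int)) (rows cols : Int) (path : pvPath) (c : Int × Int) :
    ∀ (dirs : List (Int × (Int × Int))),
      (∀ e ∈ dirs, ((PySem.List.index? pvDirsA e.2).getD 0) = e.1.toNat) →
    ∀ (qpre : List (Int × Int)) (ns : List pvPath) (v : List (List Bool)) (p : pvPD),
      pvDims rows cols v → pvInvV p v → pvInvK rows cols p →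
      ∃ (news : List pvPath) (v1 : List (List Bool)) (p1 : pvPD),
        (dirs.map Prod.snd).foldl (pvStepA maze rows cols c.1 c.2)
            (qpre ++ ns.map pvLastC, v, p) = (qpre ++ (ns ++ news).map pvLastC, v1, p1) ∧
        dirs.foldl (pvStepB maze rows cols path c.1 c.2) (ns, v) = (ns ++ news, v1) ∧
        (∀ k, p.contains k = true → p1.get? k = p.get? k) ∧
        pvInvV p1 v1 ∧ pvInvK rows cols p1 ∧ pvDims rows cols v1 ∧
        pvMvis rows cols v1 + news.length ≤ pvMvis rows cols v ∧
        (∀ pe ∈ news, ∃ cc, pe = path ++ [cc] ∧ p1.get? cc = some c ∧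
          pe.length = path.length + 1) ∧
        (∀ r cc, pvInR rows cols (r, cc) → pvVisGetA v r cc = true → pvVisGetA v1 r cc = true) ∧
        (∀ e ∈ dirs,
          (0 ≤ c.1 + e.2.1 ∧ c.1 + e.2.1 < rows ∧ 0 ≤ c.2 + e.2.2 ∧ c.2 + e.2.2 < cols ∧
            PySem.Int.band (pvMazeA maze c.1 c.2) ((8 : Int) >>> e.1.toNat) = 0) →
          pvVisGetA v1 (c.1 + e.2.1) (c.2 + e.2.2) = true) := by
  intro dirs
  induction dirs with
  | nil =>
    intro _ qpre ns v p hd hv hk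
    exact ⟨[], v, p, by simp, by simp, fun k _ => rfl, hv, hk, hd, by simp,
      by simp, fun r cc _ ht => ht, by simp⟩
  | cons e rest ih =>
    intro hidx qpre ns v p hd hv hk
    have hie := hidx e (List.mem_cons_self)
    have hidx' := fun e' he' => hidx e' (List.mem_cons_of_mem e he')
    simp only [List.map_cons, List.foldl_cons]
    by_cases hg : 0 ≤ c.1 + e.2.1 ∧ c.1 + e.2.1 < rows ∧ 0 ≤ c.2 + e.2.2 ∧ c.2 + e.2.2 < cols ∧
        pvVisGetA v (c.1 + e.2.1) (c.2 + e.2.2) = false ∧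
        PySem.Int.band (pvMazeA maze c.1 c.2) ((8 : Int) >>> e.1.toNat) = 0
    · -- this direction pushes a fresh cell on both sides
      obtain ⟨b1, b2, b3, b4, b5, b6⟩ := hg
      have hin : pvInR rows cols (c.1 + e.2.1, c.2 + e.2.2) := ⟨b1, b2, b3, b4⟩
      have hA : pvStepA maze rows cols c.1 c.2 (qpre ++ ns.map pvLastC, v, p) e.2 =
          (qpre ++ ns.map pvLastC ++ [(c.1 + e.2.1, c.2 + e.2.2)],
           pvVisSetA v (c.1 + e.2.1) (c.2 + e.2.2),
           p.insert (c.1 + e.2.1, c.2 + e.2.2) (c.1, c.2)) := by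
        simp only [pvStepA]
        rw [if_pos ⟨b1, b2, b3, b4, b5⟩, if_pos (by rw [hie]; exact b6)]
      have hB : pvStepB maze rows cols path c.1 c.2 (ns, v) e =
          (ns ++ [path ++ [(c.1 + e.2.1, c.2 + e.2.2)]],
           pvVisSetA v (c.1 + e.2.1) (c.2 + e.2.2)) := by
        simp only [pvStepB, pvVisGetB_eq, pvVisSetB_eq, pvMazeB_eq]
        rw [if_pos ⟨b1, b2, b3, b4, b5, b6⟩]
      rw [hA, hB]
      have hfresh : p.contains (c.1 + e.2.1, c.2 + e.2.2) = false := by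
        cases hc : p.contains (c.1 + e.2.1, c.2 + e.2.2)
        · rfl
        · have := hv _ hc
          dsimp only at this
          rw [this] at b5; exact Bool.noConfusion b5
      have hd' := pv_dims_set v rows cols _ _ hd hin
      have hv' : pvInvV (p.insert (c.1 + e.2.1, c.2 + e.2.2) (c.1, c.2))
          (pvVisSetA v (c.1 + e.2.1) (c.2 + e.2.2)) := by
        intro k hkc
        rw [PySem.Dict.contains_insert] at hkc
        rcases Bool.or_eq_true_iff.mp hkc with hkc | hkc
        · have : k = (c.1 + e.2.1, c.2 + e.2.2) := by simpa using hkc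
          subst this
          exact pv_visget_set_self v rows cols _ _ hd hin
        · have hkin := hk k hkc
          exact pv_visget_set_mono v rows cols _ _ k.1 k.2 hd hin
            (by simpa using hkin) (hv k hkc)
      have hk' : pvInvK rows cols (p.insert (c.1 + e.2.1, c.2 + e.2.2) (c.1, c.2)) := by
        intro k hkc
        rw [PySem.Dict.contains_insert] at hkc
        rcases Bool.or_eq_true_iff.mp hkc with hkc | hkc
        · have : k = (c.1 + e.2.1, c.2 + e.2.2) := by simpa using hkc
          subst this; exact hin
        · exact hk k hkc
      have hqeq : qpre ++ ns.map pvLastC ++ [(c.1 + e.2.1, c.2 + e.2.2)] =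
          qpre ++ (ns ++ [path ++ [(c.1 + e.2.1, c.2 + e.2.2)]]).map pvLastC := by
        simp [pvLastC_append]
      rw [hqeq]
      obtain ⟨news', v1, p1, c1, c2, c3, c4, c5, c6, c7, c8, c9, c10⟩ :=
        ih hidx' qpre (ns ++ [path ++ [(c.1 + e.2.1, c.2 + e.2.2)]])
          (pvVisSetA v (c.1 + e.2.1) (c.2 + e.2.2))
          (p.insert (c.1 + e.2.1, c.2 + e.2.2) (c.1, c.2)) hd' hv' hk'
      have hmv := pv_mvis_set v rows cols _ _ hd hin b5
      refine ⟨(path ++ [(c.1 + e.2.1, c.2 + e.2.2)]) :: news', v1, p1, ?_, ?_, ?_, c4, c5, c6,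
        ?_, ?_, ?_, ?_⟩
      · rw [c1]; simp
      · rw [c2]; simp
      · intro k hkc
        have hkne : k ≠ (c.1 + e.2.1, c.2 + e.2.2) := by
          intro he; subst he; rw [hfresh] at hkc; exact Bool.noConfusion hkc
        have hkc' : (p.insert (c.1 + e.2.1, c.2 + e.2.2) (c.1, c.2)).contains k = true := by
          rw [PySem.Dict.contains_insert]; simp [hkc]
        rw [c3 k hkc']
        exact PySem.Dict.get?_insert_of_ne p (c.1, c.2) hkne
      · simp only [List.length_cons]; omega
      · intro pe hpe
        rcases List.mem_cons.mp hpe with hpe | hpe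
        · subst hpe
          refine ⟨(c.1 + e.2.1, c.2 + e.2.2), rfl, ?_, by simp⟩
          have := c3 _ (PySem.Dict.contains_insert_self p _ (c.1, c.2))
          rw [this, PySem.Dict.get?_insert_self]
        · obtain ⟨cc, hcc1, hcc2, hcc3⟩ := c8 pe hpe
          exact ⟨cc, hcc1, hcc2, hcc3⟩
      · intro r cc hrc ht
        exact c9 r cc hrc (pv_visget_set_mono v rows cols _ _ r cc hd hin hrc ht)
      · intro e' he' hopen
        rcases List.mem_cons.mp he' with he' | he'
        · subst he'
          exact c9 _ _ hin (pv_visget_set_self v rows cols _ _ hd hin)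
        · exact c10 e' he' hopen
    · -- no-op on both sides
      have hA : pvStepA maze rows cols c.1 c.2 (qpre ++ ns.map pvLastC, v, p) e.2 =
          (qpre ++ ns.map pvLastC, v, p) := by
        simp only [pvStepA]
        split_ifs with h1 h2
        · exfalso
          obtain ⟨a1, a2, a3, a4, a5⟩ := h1
          rw [hie] at h2
          exact hg ⟨a1, a2, a3, a4, a5, h2⟩
        · rfl
        · rfl
      have hB : pvStepB maze rows cols path c.1 c.2 (ns, v) e = (ns, v) := by
        simp only [pvStepB, pvVisGetB_eq, pvMazeB_eq]
        rw [if_neg]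
        intro h1
        exact hg h1
      rw [hA, hB]
      obtain ⟨news', v1, p1, c1, c2, c3, c4, c5, c6, c7, c8, c9, c10⟩ :=
        ih hidx' qpre ns v p hd hv hk
      refine ⟨news', v1, p1, c1, c2, c3, c4, c5, c6, c7, c8, c9, ?_⟩
      intro e' he' hopen
      rcases List.mem_cons.mp he' with he' | he'
      · subst he'
        obtain ⟨a1, a2, a3, a4, a5⟩ := hopen
        have hvt : pvVisGetA v (c.1 + e'.2.1) (c.2 + e'.2.2) = true := by
          cases hvv : pvVisGetA v (c.1 + e'.2.1) (c.2 + e'.2.2)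
          · exact absurd ⟨a1, a2, a3, a4, hvv, a5⟩ hg
          · rfl
        exact c9 _ _ ⟨a1, a2, a3, a4⟩ hvt
      · exact c10 e' he' hopen

-- the frontier scan: B's pvScanB against A's pop-by-pop loop
theorem pv_scan (maze : List (List Int)) (rows cols : Int) (start end_ : Int × Int)
    (wf K : Nat) (hse : start ≠ end_) (hKwf : K ≤ wf) :
    ∀ (fs nxt : List pvPath) (v : List (List Bool)) (p : pvPD) (fA : Nat),
      pvINV maze rows cols start K (fs ++ nxt) v p →
      fs.length + nxt.length + 2 * pvMvis rows cols v ≤ fA →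
      (match pvScanB maze rows cols end_ fs nxt v with
       | .inl path =>
          pvLoopA maze rows cols start end_ wf fA (fs.map pvLastC ++ nxt.map pvLastC) v p = some path
       | .inr (n, v') => ∃ p',
          pvLoopA maze rows cols start end_ wf fA (fs.map pvLastC ++ nxt.map pvLastC) v p
            = pvLoopA maze rows cols start end_ wf (fA - fs.length) (n.map pvLastC) v' p' ∧
          pvINV maze rows cols start K n v' p' ∧
          n.length + 2 * pvMvis rows cols v' ≤ fA - fs.length ∧
          pvMvis rows cols v' + n.length ≤ pvMvis rows cols v + nxt.length) := by
  intro fs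
  induction fs with
  | nil =>
    intro nxt v p fA hINV hfuel
    simp only [pvScanB, List.map_nil, List.nil_append, List.length_nil]
    exact ⟨p, by simp, hINV, by omega, by omega⟩
  | cons path rest ih =>
    intro nxt v p fA hINV hfuel
    obtain ⟨hd, hv, hk, hGH, hent⟩ := hINV
    obtain ⟨hpne, hplen, hpwalk⟩ := hent path (by simp)
    cases fA with
    | zero => simp at hfuel
    | succ fA' =>
    have hidx : ∀ e ∈ PySem.List.enumerate pvDirsB 0,
        ((PySem.List.index? pvDirsA e.2).getD 0) = e.1.toNat := by decide
    have hmapsnd : (PySem.List.enumerate pvDirsB 0).map Prod.snd = pvDirsA := by decide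
    simp only [List.length_cons] at hfuel
    simp only [List.map_cons, List.cons_append, List.length_cons]
    by_cases hend : pvLastC path = end_
    · -- found: A pops the end cell, B returns the stored path
      have hscan : pvScanB maze rows cols end_ (path :: rest) nxt v = Sum.inl path := by
        simp only [pvScanB]
        rw [if_pos hend]
      rw [hscan]
      simp only [pvLoopA]
      rw [if_pos hend]
      rcases hpwalk with hstart | hW
      · exact absurd (hstart ▸ hend) hse
      · exact hW wf (by omega)
    · -- not found: expand on both sides
      have hscan : pvScanB maze rows cols end_ (path :: rest) nxt v =
          pvScanB maze rows cols end_ rest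
            ((PySem.List.enumerate pvDirsB 0).foldl
              (pvStepB maze rows cols path (pvLastC path).1 (pvLastC path).2) (nxt, v)).1
            ((PySem.List.enumerate pvDirsB 0).foldl
              (pvStepB maze rows cols path (pvLastC path).1 (pvLastC path).2) (nxt, v)).2 := by
        conv_lhs => simp only [pvScanB]
        rw [if_neg hend]
      have hloopstep : pvLoopA maze rows cols start end_ wf (fA' + 1)
            (pvLastC path :: (rest.map pvLastC ++ nxt.map pvLastC)) v p =
          pvLoopA maze rows cols start end_ wf fA'
            (pvDirsA.foldl (pvStepA maze rows cols (pvLastC path).1 (pvLastC path).2)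
              (rest.map pvLastC ++ nxt.map pvLastC, v, p)).1
            (pvDirsA.foldl (pvStepA maze rows cols (pvLastC path).1 (pvLastC path).2)
              (rest.map pvLastC ++ nxt.map pvLastC, v, p)).2.1
            (pvDirsA.foldl (pvStepA maze rows cols (pvLastC path).1 (pvLastC path).2)
              (rest.map pvLastC ++ nxt.map pvLastC, v, p)).2.2 := by
        simp only [pvLoopA]
        rw [if_neg hend]
      have hmain : (∀ f, path.length ≤ f → pvWalkA start f p (pvLastC path) [] = some path) ∨
          (pvLastC path = start ∧ pvG maze rows cols start v) := by
        rcases hpwalk with hstart | hW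
        · rcases hGH with hall | hGv
          · left
            have hps : path = [start] := hall path (by simp)
            intro f hf
            subst hps
            rw [pvLastC_singleton]
            have : 1 ≤ f := by simpa using hf
            rw [pv_walk_start start f p this]
          · exact Or.inr ⟨hstart, hGv⟩
        · exact Or.inl hW
      rcases hmain with hW | ⟨hstart, hGv⟩
      · -- normal expansion via the joint fold lemma
        obtain ⟨news, v1, p1, c1, c2, c3, c4, c5, c6, c7, c8, c9, c10⟩ :=
          pv_foldAB maze rows cols path (pvLastC path) (PySem.List.enumerate pvDirsB 0) hidx
            (rest.map pvLastC) nxt v p hd hv hk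
        rw [hmapsnd] at c1
        have hnewsbnd : ∀ pe ∈ news, news.length ≥ 1 := by
          intro pe hpe
          cases news with
          | nil => simp at hpe
          | cons a l => simp
        have hINV1 : pvINV maze rows cols start K (rest ++ (nxt ++ news)) v1 p1 := by
          refine ⟨c6, c4, c5, ?_, ?_⟩
          · right
            rcases hGH with hall | hGv0
            · have hps : path = [start] := hall path (by simp)
              intro e he hopen
              have := c10 e he
              rw [hps, pvLastC_singleton] at this
              exact this hopen
            · intro e he hopen
              refine c9 _ _ ⟨hopen.1, hopen.2.1, hopen.2.2.1, hopen.2.2.2.1⟩ (hGv0 e he hopen)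
          · intro pe hpe
            rcases List.mem_append.mp hpe with hpe | hpe'
            · -- an old entry of rest
              obtain ⟨hne, hlen, hwd⟩ := hent pe (by simp [hpe])
              refine ⟨hne, by omega, ?_⟩
              rcases hwd with hs | hw
              · exact Or.inl hs
              · exact Or.inr (fun f hf => pv_walk_mono start f p p1 (pvLastC pe) [] pe (hw f hf) c3)
            · rcases List.mem_append.mp hpe' with hpe | hpe
              · -- an old entry of nxt
                obtain ⟨hne, hlen, hwd⟩ := hent pe (by simp [hpe])
                refine ⟨hne, by omega, ?_⟩
                rcases hwd with hs | hw
                · exact Or.inl hs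
                · exact Or.inr (fun f hf => pv_walk_mono start f p p1 (pvLastC pe) [] pe (hw f hf) c3)
              · -- a new entry
                obtain ⟨cc, hcc1, hcc2, hcc3⟩ := c8 pe hpe
                have hlen1 : news.length ≥ 1 := hnewsbnd pe hpe
                refine ⟨by simp [hcc1], by omega, ?_⟩
                by_cases hcs : cc = start
                · left; rw [hcc1, pvLastC_append, hcs]
                · right
                  intro f hf
                  rw [hcc1, pvLastC_append]
                  rw [hcc1, List.length_append, List.length_singleton] at hf
                  cases f with
                  | zero => omega
                  | succ g =>
                    simp only [pvWalkA]
                    rw [if_neg hcs, hcc2]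
                    dsimp only
                    have hwp : pvWalkA start g p1 (pvLastC path) [] = some path :=
                      pv_walk_mono start g p p1 (pvLastC path) [] path (hW g (by omega)) c3
                    rw [pv_walk_acc, hwp]
                    simp
        have hfuel1 : rest.length + (nxt ++ news).length + 2 * pvMvis rows cols v1 ≤ fA' := by
          simp only [List.length_append]
          omega
        have hih := ih (nxt ++ news) v1 p1 fA' hINV1 hfuel1
        rw [hscan, c2]
        rw [hloopstep, c1]
        cases hsc : pvScanB maze rows cols end_ rest (nxt ++ news) v1 with
        | inl path2 =>
          rw [hsc] at hih
          simpa using hih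
        | inr nv =>
          rw [hsc] at hih
          obtain ⟨p', he1, he2, he3, he4⟩ := hih
          refine ⟨p', ?_, he2, by omega, ?_⟩
          · simp only [Nat.succ_sub_succ]
            simpa using he1
          · simp only [List.length_append] at he4
            omega
      · -- the popped cell is a re-enqueued start: the expansion is a no-op
        have hGv' : ∀ e ∈ PySem.List.enumerate pvDirsB 0,
            (0 ≤ (pvLastC path).1 + e.2.1 ∧ (pvLastC path).1 + e.2.1 < rows ∧
             0 ≤ (pvLastC path).2 + e.2.2 ∧ (pvLastC path).2 + e.2.2 < cols ∧
             PySem.Int.band (pvMazeA maze (pvLastC path).1 (pvLastC path).2)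
               ((8 : Int) >>> e.1.toNat) = 0) →
            pvVisGetA v ((pvLastC path).1 + e.2.1) ((pvLastC path).2 + e.2.2) = true := by
          rw [hstart]; exact hGv
        obtain ⟨hAno, hBno⟩ := pv_fold_noop maze rows cols (pvLastC path) path
          (PySem.List.enumerate pvDirsB 0) (rest.map pvLastC ++ nxt.map pvLastC) nxt v p
          hGv' hidx
        rw [hmapsnd] at hAno
        have hINV1 : pvINV maze rows cols start K (rest ++ nxt) v p := by
          refine ⟨hd, hv, hk, Or.inr hGv, ?_⟩
          intro pe hpe
          exact hent pe (by rcases List.mem_append.mp hpe with h | h <;> simp [h])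
        have hih := ih nxt v p fA' hINV1 (by omega)
        rw [hscan, hBno]
        rw [hloopstep, hAno]
        cases hsc : pvScanB maze rows cols end_ rest nxt v with
        | inl path2 =>
          rw [hsc] at hih
          simpa using hih
        | inr nv =>
          rw [hsc] at hih
          obtain ⟨p', he1, he2, he3, he4⟩ := hih
          refine ⟨p', ?_, he2, by omega, by omega⟩
          simp only [Nat.succ_sub_succ]
          simpa using he1

theorem pvLoopA_nil (maze : List (List Int)) (rows cols : Int) (start end_ : Int × Int)
    (wf fA : Nat) (v : List (List Bool)) (p : pvPD) :
    pvLoopA maze rows cols start end_ wf fA [] v p = none := by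
  cases fA <;> rfl

-- the level loop: A's early-exit loop against B's level-synchronous loop
theorem pv_levels (maze : List (List Int)) (rows cols : Int) (start end_ : Int × Int)
    (wf K : Nat) (hse : start ≠ end_) (hKwf : K ≤ wf) :
    ∀ (fA : Nat) (frontier : List pvPath) (v : List (List Bool)) (p : pvPD) (fB : Nat),
      pvINV maze rows cols start K frontier v p →
      frontier.length + 2 * pvMvis rows cols v ≤ fA →
      pvMvis rows cols v + 2 ≤ fB →
      pvLoopA maze rows cols start end_ wf fA (frontier.map pvLastC) v p =
        pvLoopBl maze rows cols end_ fB frontier v := by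
  intro fA
  induction fA using Nat.strong_induction_on with
  | _ fA ihs =>
  intro frontier v p fB hINV hfuelA hfuelB
  cases fB with
  | zero => omega
  | succ g =>
  by_cases hfe : frontier = []
  · subst hfe
    rw [List.map_nil, pvLoopA_nil]
    simp [pvLoopBl]
  · simp only [pvLoopBl]
    rw [if_neg hfe]
    have hs := pv_scan maze rows cols start end_ wf K hse hKwf frontier [] v p fA
      (by simpa using hINV) (by simpa using hfuelA)
    cases hsc : pvScanB maze rows cols end_ frontier [] v with
    | inl path =>
      rw [hsc] at hs
      simpa using hs
    | inr nv =>
      obtain ⟨n, v'⟩ := nv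
      rw [hsc] at hs
      obtain ⟨p', he1, he2, he3, he4⟩ := hs
      simp only [List.map_nil, List.append_nil, List.length_nil] at he1 he4
      rw [he1]
      by_cases hne : n = []
      · subst hne
        rw [List.map_nil, pvLoopA_nil]
        cases g with
        | zero => omega
        | succ g' => simp [pvLoopBl]
      · have hfl : 1 ≤ frontier.length := List.length_pos_iff.mpr hfe
        have hnl : 1 ≤ n.length := List.length_pos_iff.mpr hne
        exact ihs (fA - frontier.length) (by omega) n v' p' g he2 he3 (by omega)

-- ===== VERDICT (by name: the statement is the Claim_ definition above) =====
theorem bfs_algorithm_spec : Claim_equal_bfs_algorithm := by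
  unfold Claim_equal_bfs_algorithm
  intro maze start end_ _ hpre
  unfold Spec_bfs_algorithm
  obtain ⟨hmne, hcase⟩ := hpre
  cases maze with
  | nil => exact absurd rfl hmne
  | cons row0 mrest =>
  simp only [bfs_algorithm, bfs_algorithm_alt]
  have hcols : PySem.List.pyGetD (row0 :: mrest) 0 ([] : List Int) = row0 := by
    rw [PySem.List.pyGetD_zero]; rfl
  rw [hcols]
  by_cases hse : start = end_
  · -- start == end: A returns at the first pop, B at the first scan entry
    rw [show (2 * (row0 :: mrest).length * row0.length + 2)
        = (2 * (row0 :: mrest).length * row0.length + 1) + 1 from rfl]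
    simp only [pvLoopA, pvLoopBl]
    rw [if_pos hse, if_neg (show ¬(([[start]] : List pvPath) = []) by simp)]
    have hscan : pvScanB (row0 :: mrest) ((row0 :: mrest).length : Int) (row0.length : Int)
        end_ [[start]] [] (List.replicate (row0 :: mrest).length (List.replicate row0.length false))
        = Sum.inl [start] := by
      simp only [pvScanB, pvLastC_singleton]
      rw [if_pos hse]
    rw [hscan]
    rw [pv_walk_start start _ _ (by omega)]
  · rcases hcase with hse' | ⟨hrect, hs1, hs2, hs3, hs4⟩ | ⟨hf1, hf2, hf3, hf4⟩
    · exact absurd hse' hse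
    · -- rectangular maze, in-bounds start: the main simulation argument
      simp only [List.headD_cons] at hrect hs4
      have hd0 : pvDims ((row0 :: mrest).length : Int) (row0.length : Int)
          (List.replicate (row0 :: mrest).length (List.replicate row0.length false)) := by
        constructor
        · simp
        · intro row hrow
          rw [List.eq_of_mem_replicate hrow]
          simp
      have hMle : pvMvis ((row0 :: mrest).length : Int) (row0.length : Int)
          (List.replicate (row0 :: mrest).length (List.replicate row0.length false)) ≤
          (row0 :: mrest).length * row0.length := by
        unfold pvMvis
        calc _ ≤ (Finset.range (((row0 :: mrest).length : Int)).toNat ×ˢ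
                  Finset.range (((row0.length : Int)).toNat)).card := Finset.card_filter_le _ _
          _ = _ := by simp [Finset.card_product]
      have hINV0 : pvINV (row0 :: mrest) ((row0 :: mrest).length : Int) (row0.length : Int)
          start ((row0 :: mrest).length * row0.length + 1) [[start]]
          (List.replicate (row0 :: mrest).length (List.replicate row0.length false))
          PySem.Dict.empty := by
        refine ⟨hd0, ?_, ?_, ?_, ?_⟩
        · intro k hc
          simp [PySem.Dict.contains_empty] at hc
        · intro k hc
          simp [PySem.Dict.contains_empty] at hc
        · left
          intro path hp
          simpa using hp
        · intro path hp
          have hps : path = [start] := by simpa using hp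
          subst hps
          refine ⟨by simp, ?_, Or.inr ?_⟩
          · have hM := hMle
            rw [List.length_singleton]
            omega
          · intro f hf
            rw [pvLastC_singleton, pv_walk_start start f _ (by simpa using hf)]
      have hlv := pv_levels (row0 :: mrest) ((row0 :: mrest).length : Int) (row0.length : Int)
        start end_ (2 * (row0 :: mrest).length * row0.length + 2)
        ((row0 :: mrest).length * row0.length + 1) hse (by rw [Nat.mul_assoc]; omega)
        (2 * (row0 :: mrest).length * row0.length + 2) [[start]]
        (List.replicate (row0 :: mrest).length (List.replicate row0.length false))
        PySem.Dict.empty (2 * (row0 :: mrest).length * row0.length + 2) hINV0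
        (by have hM := hMle; simp only [List.length_singleton]; rw [Nat.mul_assoc]; omega)
        (by have hM := hMle; rw [Nat.mul_assoc]; omega)
      simpa [pvLastC_singleton] using hlv
    · -- start so far out of bounds that no neighbour is in bounds: both explore nothing
      simp only [List.headD_cons] at hf1 hf2 hf3 hf4
      have s1 : ∀ st : pvSt, pvStepA (row0 :: mrest) ((row0 :: mrest).length : Int)
          (row0.length : Int) start.1 start.2 st (0, -1) = st := by
        intro st
        simp only [pvStepA]
        rw [if_neg]
        rintro ⟨a, b, c, d, -⟩
        exact hf1 ⟨by omega, by omega, by omega, by omega⟩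
      have s2 : ∀ st : pvSt, pvStepA (row0 :: mrest) ((row0 :: mrest).length : Int)
          (row0.length : Int) start.1 start.2 st (0, 1) = st := by
        intro st
        simp only [pvStepA]
        rw [if_neg]
        rintro ⟨a, b, c, d, -⟩
        exact hf2 ⟨by omega, by omega, by omega, by omega⟩
      have s3 : ∀ st : pvSt, pvStepA (row0 :: mrest) ((row0 :: mrest).length : Int)
          (row0.length : Int) start.1 start.2 st (1, 0) = st := by
        intro st
        simp only [pvStepA]
        rw [if_neg]
        rintro ⟨a, b, c, d, -⟩
        exact hf3 ⟨by omega, by omega, by omega, by omega⟩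
      have s4 : ∀ st : pvSt, pvStepA (row0 :: mrest) ((row0 :: mrest).length : Int)
          (row0.length : Int) start.1 start.2 st (-1, 0) = st := by
        intro st
        simp only [pvStepA]
        rw [if_neg]
        rintro ⟨a, b, c, d, -⟩
        exact hf4 ⟨by omega, by omega, by omega, by omega⟩
      have hexp : pvDirsA.foldl (pvStepA (row0 :: mrest) ((row0 :: mrest).length : Int)
          (row0.length : Int) start.1 start.2)
          (([] : List (Int × Int)), List.replicate (row0 :: mrest).length (List.replicate row0.length false),
            (PySem.Dict.empty : pvPD)) =
          (([] : List (Int × Int)), List.replicate (row0 :: mrest).length (List.replicate row0.length false),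
            (PySem.Dict.empty : pvPD)) := by
        simp only [pvDirsA, List.foldl_cons, List.foldl_nil, s1, s2, s3, s4]
      have t1 : ∀ st : List pvPath × List (List Bool),
          pvStepB (row0 :: mrest) ((row0 :: mrest).length : Int) (row0.length : Int)
            [start] start.1 start.2 st ((0 : Int), ((0 : Int), (-1 : Int))) = st := by
        intro st
        simp only [pvStepB]
        rw [if_neg]
        rintro ⟨a, b, c, d, -⟩
        exact hf1 ⟨by omega, by omega, by omega, by omega⟩
      have t2 : ∀ st : List pvPath × List (List Bool),
          pvStepB (row0 :: mrest) ((row0 :: mrest).length : Int) (row0.length : Int)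
            [start] start.1 start.2 st ((1 : Int), ((0 : Int), (1 : Int))) = st := by
        intro st
        simp only [pvStepB]
        rw [if_neg]
        rintro ⟨a, b, c, d, -⟩
        exact hf2 ⟨by omega, by omega, by omega, by omega⟩
      have t3 : ∀ st : List pvPath × List (List Bool),
          pvStepB (row0 :: mrest) ((row0 :: mrest).length : Int) (row0.length : Int)
            [start] start.1 start.2 st ((2 : Int), ((1 : Int), (0 : Int))) = st := by
        intro st
        simp only [pvStepB]
        rw [if_neg]
        rintro ⟨a, b, c, d, -⟩
        exact hf3 ⟨by omega, by omega, by omega, by omega⟩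
      have t4 : ∀ st : List pvPath × List (List Bool),
          pvStepB (row0 :: mrest) ((row0 :: mrest).length : Int) (row0.length : Int)
            [start] start.1 start.2 st ((3 : Int), ((-1 : Int), (0 : Int))) = st := by
        intro st
        simp only [pvStepB]
        rw [if_neg]
        rintro ⟨a, b, c, d, -⟩
        exact hf4 ⟨by omega, by omega, by omega, by omega⟩
      have hlB : PySem.List.enumerate pvDirsB 0 =
          [((0 : Int), ((0 : Int), (-1 : Int))), (1, (0, 1)), (2, (1, 0)), (3, (-1, 0))] := rfl
      have hexpB : (PySem.List.enumerate pvDirsB 0).foldl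
          (pvStepB (row0 :: mrest) ((row0 :: mrest).length : Int) (row0.length : Int)
            [start] start.1 start.2)
          (([] : List pvPath), List.replicate (row0 :: mrest).length (List.replicate row0.length false)) =
          (([] : List pvPath), List.replicate (row0 :: mrest).length (List.replicate row0.length false)) := by
        rw [hlB]
        simp only [List.foldl_cons, List.foldl_nil, t1, t2, t3, t4]
      have hAeq : pvLoopA (row0 :: mrest) ((row0 :: mrest).length : Int) (row0.length : Int)
          start end_ (2 * (row0 :: mrest).length * row0.length + 2)
          (2 * (row0 :: mrest).length * row0.length + 2) [start]
          (List.replicate (row0 :: mrest).length (List.replicate row0.length false))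
          PySem.Dict.empty = none := by
        rw [show (2 * (row0 :: mrest).length * row0.length + 2)
            = (2 * (row0 :: mrest).length * row0.length + 1) + 1 from rfl]
        simp only [pvLoopA]
        rw [if_neg hse, hexp]
        dsimp only
        exact pvLoopA_nil _ _ _ _ _ _ _ _ _
      have hscanB : pvScanB (row0 :: mrest) ((row0 :: mrest).length : Int) (row0.length : Int)
          end_ [[start]] []
          (List.replicate (row0 :: mrest).length (List.replicate row0.length false)) =
          Sum.inr (([] : List pvPath),
            List.replicate (row0 :: mrest).length (List.replicate row0.length false)) := by
        simp only [pvScanB, pvLastC_singleton]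
        rw [if_neg hse, hexpB]
      have hBeq : pvLoopBl (row0 :: mrest) ((row0 :: mrest).length : Int) (row0.length : Int)
          end_ (2 * (row0 :: mrest).length * row0.length + 2) [[start]]
          (List.replicate (row0 :: mrest).length (List.replicate row0.length false)) = none := by
        rw [show (2 * (row0 :: mrest).length * row0.length + 2)
            = (2 * (row0 :: mrest).length * row0.length + 1) + 1 from rfl]
        simp only [pvLoopBl]
        rw [if_neg (show ¬(([[start]] : List pvPath) = []) by simp), hscanB]
        simp
      rw [hAeq, hBeq]
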